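-- pv_equiv track=rewrite | github.com/ZaraGiraffe/ucu_labs | lab7/cmudict.py | dict_invert2
-- ===== SOURCE A (Python) =====
-- def dict_sort(dict: dict):
--     '''
--     sorts dict by keys
--     '''
--     res = {}
--     s = sorted(dict.keys())
--     for i in s:
--         res[i] = dict[i]
--     return res
--
-- def dict_invert2(dct: dict):
--     '''
--     dict_invert for dict
--     '''
--     res = {}
--     for i in dct:
--         if len(dct[i]) not in res:
--             res[len(dct[i])] = set()
--         for j in dct[i]:
--             res[len(dct[i])].add((i, j))
--     return dict_sort(res)
-- ===== SOURCE B (Python) =====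
-- def dict_invert2(dct: dict):
--     '''
--     dict_invert for dict — group (key, item) pairs by value length, lengths ascending
--     '''
--     lengths = sorted({len(v) for v in dct.values()})
--     return {n: {(k, j) for k, v in dct.items() if len(v) == n for j in v}
--             for n in lengths}
-- ===== Notes on version B (the rewrite author's own statement) =====
-- stated objective: simpler
-- what changed: Instead of A's single pass that incrementally builds a dict of sets (ensure-key guard, element-by-element set.add) followed by a separate key-sorting rebuild, B sorts the distinct value lengths up front and builds the whole result as one dict comprehension whose groups are set comprehensions filtering the input per length.
import Mathlib
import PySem

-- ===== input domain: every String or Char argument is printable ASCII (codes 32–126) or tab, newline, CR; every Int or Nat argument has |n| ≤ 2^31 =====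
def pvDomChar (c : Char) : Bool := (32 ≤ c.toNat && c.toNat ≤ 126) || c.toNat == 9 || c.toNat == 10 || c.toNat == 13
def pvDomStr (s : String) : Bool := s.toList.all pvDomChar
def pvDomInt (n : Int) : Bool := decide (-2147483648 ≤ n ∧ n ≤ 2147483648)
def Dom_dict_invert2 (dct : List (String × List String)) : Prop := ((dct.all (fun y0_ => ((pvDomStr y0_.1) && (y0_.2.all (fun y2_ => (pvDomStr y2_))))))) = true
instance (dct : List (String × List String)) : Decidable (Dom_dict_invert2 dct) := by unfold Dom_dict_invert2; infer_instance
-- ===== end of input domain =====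

-- B replaces A's incremental dict-of-sets (ensure key, add pairs one by one, then sort the keys) by
-- sorting the distinct value lengths first and building each group with one comprehension: simpler.

-- ===== PORT A =====
-- body of A's 'for i in dct' loop: ensure res[len(dct[i])] exists, then add every (i, j) to it
def pvAstep (res : PySem.Dict Int (PySem.Set (String × String))) (p : String × List String) :
    PySem.Dict Int (PySem.Set (String × String)) :=
  let L : Int := (p.2.length : Int)
  let res1 := if res.contains L then res else res.insert L PySem.Set.empty
  p.2.foldl (fun r j => r.insert L (PySem.Set.add (r.getD L PySem.Set.empty) (p.1, j))) res1

-- A's helper 'dict_sort'; 'dict[i]' for i drawn from dict.keys() always hits, so getD is exact here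
def dict_sort (d : PySem.Dict Int (PySem.Set (String × String))) :
    PySem.Dict Int (PySem.Set (String × String)) :=
  (PySem.List.sorted d.keys (fun x => x) false).foldl
    (fun acc k => acc.insert k (d.getD k PySem.Set.empty)) PySem.Dict.empty

def dict_invert2 (dct : List (String × List String)) : List (Int × List (String × String)) :=
  (dict_sort (dct.foldl pvAstep PySem.Dict.empty)).items

-- ===== PORT B =====
def dict_invert2_alt (dct : List (String × List String)) : List (Int × List (String × String)) :=
  let lengths := PySem.List.sorted
    (PySem.Set.ofList (dct.map (fun p => ((p.2.length : Int))))) (fun x => x) false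
  (lengths.foldl (fun d n =>
      d.insert n (PySem.Set.ofList
        ((dct.filter (fun p => ((p.2.length : Int) == n))).flatMap
          (fun p => p.2.map (fun j => (p.1, j))))))
    PySem.Dict.empty).items

-- ===== PRECONDITION & SPEC =====
def Spec_dict_invert2 (dct : List (String × List String)) (out : List (Int × List (String × String))) : Prop := out = dict_invert2_alt dct
instance (dct : List (String × List String)) (out : List (Int × List (String × String))) : Decidable (Spec_dict_invert2 dct out) := by unfold Spec_dict_invert2; infer_instance

-- ===== CLAIM (what is proved, stated in full; the proofs are below) =====
def Claim_equal_dict_invert2 : Prop := ∀ (dct : List (String × List String)), Dom_dict_invert2 dct → Spec_dict_invert2 dct (dict_invert2 dct)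

-- ===== LEMMAS AND PROOFS =====

-- A's inner 'for j in dct[i]' loop only rewrites key L: at L it folds the pairs in, elsewhere it is invisible
theorem pvInner_getD (k : String) (L : Int) (xs : List String) (n : Int)
    (r : PySem.Dict Int (PySem.Set (String × String))) :
    ((xs.foldl (fun r j => r.insert L (PySem.Set.add (r.getD L PySem.Set.empty) (k, j))) r).getD n PySem.Set.empty) =
      if n = L then (xs.map (fun j => (k, j))).foldl PySem.Set.add (r.getD L PySem.Set.empty)
      else r.getD n PySem.Set.empty := by
  induction xs generalizing r with
  | nil => simp only [List.foldl_nil, List.map_nil]; split <;> simp_all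
  | cons x t ih =>
    simp only [List.foldl_cons, List.map_cons, ih]
    by_cases h : n = L
    · simp [h, PySem.Dict.getD_insert_self]
    · simp [h, PySem.Dict.getD_insert_of_ne _ _ _ h]

theorem pvInner_keys (k : String) (L : Int) (xs : List String)
    (r : PySem.Dict Int (PySem.Set (String × String))) (h : r.contains L = true) :
    ((xs.foldl (fun r j => r.insert L (PySem.Set.add (r.getD L PySem.Set.empty) (k, j))) r).keys) = r.keys := by
  induction xs generalizing r with
  | nil => rfl
  | cons x t ih =>
    simp only [List.foldl_cons]
    rw [ih _ (by simp [PySem.Dict.contains_insert_self]), PySem.Dict.keys_insert_of_contains _ _ h]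

-- A's 'if len not in res' guard never changes any lookup with default ∅, and makes L present
theorem pvIf_getD (d : PySem.Dict Int (PySem.Set (String × String))) (L n : Int) :
    ((if d.contains L = true then d else d.insert L PySem.Set.empty).getD n PySem.Set.empty) = d.getD n PySem.Set.empty := by
  by_cases hc : d.contains L = true
  · simp [hc]
  · simp only [Bool.not_eq_true] at hc
    by_cases h : n = L
    · subst h; simp [hc, PySem.Dict.getD_insert_self, PySem.Dict.getD_of_not_contains _ _ hc]
    · simp [hc, PySem.Dict.getD_insert_of_ne _ _ _ h]

theorem pvIf_contains (d : PySem.Dict Int (PySem.Set (String × String))) (L : Int) :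
    ((if d.contains L = true then d else d.insert L PySem.Set.empty).contains L) = true := by
  by_cases hc : d.contains L = true
  · simp [hc]
  · simp [hc, PySem.Dict.contains_insert_self]

theorem pvAstep_getD (d : PySem.Dict Int (PySem.Set (String × String))) (p : String × List String) (n : Int) :
    (pvAstep d p).getD n PySem.Set.empty =
      if ((p.2.length : Int) == n) then
        (p.2.map (fun j => (p.1, j))).foldl PySem.Set.add (d.getD n PySem.Set.empty)
      else d.getD n PySem.Set.empty := by
  unfold pvAstep
  rw [pvInner_getD, pvIf_getD, pvIf_getD]
  by_cases h : n = (p.2.length : Int)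
  · simp [h]
  · simp [h, Ne.symm h]

theorem pvAstep_keys (d : PySem.Dict Int (PySem.Set (String × String))) (p : String × List String) :
    (pvAstep d p).keys = PySem.Set.add d.keys ((p.2.length : Int)) := by
  unfold pvAstep
  rw [pvInner_keys _ _ _ _ (pvIf_contains d _)]
  by_cases hc : d.contains (p.2.length : Int) = true
  · have : (p.2.length : Int) ∈ d.keys := (PySem.Dict.contains_iff_mem_keys d _).mp hc
    simp [hc, PySem.Set.add, PySem.Set.contains, this]
  · simp only [Bool.not_eq_true] at hc
    have : ¬ (p.2.length : Int) ∈ d.keys := by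
      intro hm; rw [(PySem.Dict.contains_iff_mem_keys d _).mpr hm] at hc; cases hc
    simp only [hc, Bool.false_eq_true, if_false]
    rw [PySem.Dict.keys_insert_of_not_contains _ _ hc]
    simp [PySem.Set.add, PySem.Set.contains, this]

-- the (key, item) pairs of length-n values, in traversal order — B's group for n
def pvPairs (n : Int) (dct : List (String × List String)) : List (String × String) :=
  (dct.filter (fun p => ((p.2.length : Int) == n))).flatMap (fun p => p.2.map (fun j => (p.1, j)))

theorem pvA_getD (dct : List (String × List String)) (n : Int)
    (d : PySem.Dict Int (PySem.Set (String × String))) :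
    (dct.foldl pvAstep d).getD n PySem.Set.empty =
      (pvPairs n dct).foldl PySem.Set.add (d.getD n PySem.Set.empty) := by
  induction dct generalizing d with
  | nil => rfl
  | cons p rest ih =>
    simp only [List.foldl_cons, ih, pvPairs, List.filter_cons]
    rw [pvAstep_getD]
    by_cases h : ((p.2.length : Int) == n) = true
    · simp only [h, if_true, List.flatMap_cons, List.foldl_append]
    · simp only [h, Bool.false_eq_true, if_false]

theorem pvA_keys (dct : List (String × List String))
    (d : PySem.Dict Int (PySem.Set (String × String))) :
    (dct.foldl pvAstep d).keys = PySem.Set.update d.keys (dct.map (fun p => ((p.2.length : Int)))) := by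
  induction dct generalizing d with
  | nil => rfl
  | cons p rest ih =>
    simp only [List.foldl_cons, ih, pvAstep_keys, List.map_cons, PySem.Set.update, List.foldl_cons]

theorem pv_main (dct : List (String × List String)) : dict_invert2 dct = dict_invert2_alt dct := by
  have hkeys : (dct.foldl pvAstep PySem.Dict.empty).keys
      = PySem.Set.ofList (dct.map (fun p => ((p.2.length : Int)))) := by
    rw [pvA_keys, PySem.Set.ofList_eq_foldl]; rfl
  have hS : (PySem.List.sorted (dct.foldl pvAstep PySem.Dict.empty).keys (fun x => x) false).Nodup := by
    exact ((PySem.List.sorted_perm _ _ _).nodup_iff).mpr (by rw [hkeys]; exact PySem.Set.nodup_ofList _)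
  unfold dict_invert2 dict_sort dict_invert2_alt
  rw [PySem.Dict.items_foldl_insert_fresh _ _ _ _ (fun a _ => by simp [PySem.Dict.contains_empty]) (by simpa using hS)]
  rw [PySem.Dict.items_foldl_insert_fresh _ _ _ _ (fun a _ => by simp [PySem.Dict.contains_empty])
    (by simpa using ((PySem.List.sorted_perm _ _ _).nodup_iff).mpr (PySem.Set.nodup_ofList _))]
  rw [hkeys]
  simp only [PySem.Dict.empty, List.nil_append]
  apply List.map_congr_left
  intro n _
  congr 1
  rw [pvA_getD]
  rw [PySem.Set.ofList_eq_foldl]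
  rfl

-- ===== VERDICT (by name: the statement is the Claim_ definition above) =====
theorem dict_invert2_spec : Claim_equal_dict_invert2 := by
  intro dct _
  unfold Spec_dict_invert2
  exact pv_main dct
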